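-- pv_equiv track=rewrite | github.com/amanialdahmash/MSc_Project | spec_repair/old/Specification.py | contradiction
-- ===== SOURCE A (Python) =====
-- def contradiction(x):
--     if len(x) == 0:
--         return True
--     x = list(dict.fromkeys(x))
--     vars = [v.strip("!") for v in x]
--     var = max(vars, key=vars.count)
--     if len([y for y in vars if y == var]) > 1:
--         return True
--     return False
-- ===== SOURCE B (Python) =====
-- def contradiction(x):
--     seen = set()
--     for v in dict.fromkeys(x):
--         s = v.strip("!")
--         if s in seen:
--             return True
--         seen.add(s)
--     return len(x) == 0
-- ===== Notes on version B (the rewrite author's own statement) =====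
-- stated objective: faster
-- what changed: Replaces the max-by-count frequency scan (max with key=vars.count, which rescans the list per element, then a filter recount) with a single early-exit pass that detects a collision of stripped names in a seen-set.
import Mathlib
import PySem

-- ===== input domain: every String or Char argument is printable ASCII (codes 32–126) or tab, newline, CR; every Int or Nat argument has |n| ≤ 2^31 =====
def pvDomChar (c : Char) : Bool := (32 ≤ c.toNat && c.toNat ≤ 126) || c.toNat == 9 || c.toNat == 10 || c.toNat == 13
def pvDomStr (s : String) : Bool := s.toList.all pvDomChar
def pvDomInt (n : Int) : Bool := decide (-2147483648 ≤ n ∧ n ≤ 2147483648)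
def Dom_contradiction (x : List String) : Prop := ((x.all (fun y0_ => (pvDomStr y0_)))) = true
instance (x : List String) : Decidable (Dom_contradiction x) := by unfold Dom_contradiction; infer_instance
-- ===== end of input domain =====

-- B replaces A's max-by-count frequency scan with one early-exit seen-set pass; objective: simpler.

-- ===== PORT A =====
def contradiction (x : List String) : Bool :=
  if x.length == 0 then true
  else
    let x' := PySem.List.dedup x
    let vars := x'.map (fun v => PySem.Str.stripChars v "!")
    match PySem.List.max? vars (fun v => vars.count v) with
    | none => true   -- unreachable: vars is nonempty here, as in the Python
    | some var =>
      if (vars.filter (fun y => y == var)).length > 1 then true else false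

-- ===== PORT B =====
def contradictionAltLoop (ys : List String) (seen : PySem.Set String) : Bool :=
  match ys with
  | [] => false
  | v :: rest =>
    let s := PySem.Str.stripChars v "!"
    if PySem.Set.contains seen s then true
    else contradictionAltLoop rest (PySem.Set.add seen s)

def contradiction_alt (x : List String) : Bool :=
  contradictionAltLoop (PySem.List.dedup x) PySem.Set.empty || (x.length == 0)

-- ===== PRECONDITION & SPEC =====
def Spec_contradiction (x : List String) (out : Bool) : Prop := out = contradiction_alt x
instance (x : List String) (out : Bool) : Decidable (Spec_contradiction x out) := by unfold Spec_contradiction; infer_instance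

-- ===== CLAIM (what is proved, stated in full; the proofs are below) =====
def Claim_equal_contradiction : Prop := ∀ (x : List String), Dom_contradiction x → Spec_contradiction x (contradiction x)

-- ===== LEMMAS AND PROOFS =====

-- B's loop returns false iff the stripped names of ys are pairwise distinct and avoid `seen`.
lemma altLoop_eq_false_iff (ys : List String) (seen : PySem.Set String) :
    contradictionAltLoop ys seen = false ↔
      ((ys.map (fun v => PySem.Str.stripChars v "!")).Nodup ∧
        ∀ v ∈ ys, PySem.Str.stripChars v "!" ∉ seen) := by
  induction ys generalizing seen with
  | nil => simp [contradictionAltLoop]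
  | cons v rest ih =>
    by_cases hm : PySem.Str.stripChars v "!" ∈ seen
    · simp [contradictionAltLoop, PySem.Set.contains, hm]
    · rw [show contradictionAltLoop (v :: rest) seen =
          contradictionAltLoop rest (seen.add (PySem.Str.stripChars v "!")) from by
            simp [contradictionAltLoop, PySem.Set.contains, hm], ih]
      simp only [List.map_cons]
      constructor
      · rintro ⟨h1, h2⟩
        have hne : ∀ w ∈ rest, PySem.Str.stripChars w "!" ≠ PySem.Str.stripChars v "!" := by
          intro w hw he
          exact (h2 w hw) ((PySem.Set.mem_add seen _ _).mpr (Or.inr he))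
        refine ⟨List.nodup_cons.mpr ⟨?_, h1⟩, ?_⟩
        · intro hmem
          obtain ⟨w, hw, hws⟩ := List.mem_map.mp hmem
          exact hne w hw hws
        · intro w hw
          rcases List.mem_cons.mp hw with rfl | hw'
          · exact hm
          · intro hs
            exact (h2 w hw') ((PySem.Set.mem_add seen _ _).mpr (Or.inl hs))
      · rintro ⟨h1, h2⟩
        obtain ⟨hni, hnd⟩ := List.nodup_cons.mp h1
        refine ⟨hnd, fun w hw hs => ?_⟩
        rcases (PySem.Set.mem_add seen _ _).mp hs with hs' | hs'
        · exact h2 w (List.mem_cons.mpr (Or.inr hw)) hs'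
        · exact hni (List.mem_map.mpr ⟨w, hw, hs'⟩)

-- A's test on the maximal-count element detects exactly a duplicate in L.
lemma a_dup_iff (L : List String) (hL : L ≠ []) :
    (match PySem.List.max? L (fun v => L.count v) with
     | none => true
     | some var => if (L.filter (fun y => y == var)).length > 1 then true else false)
      = !decide L.Nodup := by
  obtain ⟨var, hvar⟩ : ∃ var, PySem.List.max? L (fun v => L.count v) = some var := by
    cases h : PySem.List.max? L (fun v => L.count v) with
    | none => exact absurd ((PySem.List.max?_eq_none_iff _ _).mp h) hL
    | some m => exact ⟨m, rfl⟩
  have hmax : ∀ y ∈ L, L.count y ≤ L.count var := PySem.List.max?_isMax hvar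
  have hflt : (L.filter (fun y => y == var)).length = L.count var := by
    simp [List.count_eq_countP, List.countP_eq_length_filter]
  rw [hvar]
  simp only [hflt]
  by_cases hnd : L.Nodup
  · have : L.count var ≤ 1 := List.nodup_iff_count_le_one.mp hnd var
    simp [hnd]; omega
  · obtain ⟨a, ha⟩ := List.exists_duplicate_iff_not_nodup.mpr hnd
    have h2 : 2 ≤ L.count a := List.duplicate_iff_two_le_count.mp ha
    have := hmax a ha.mem
    simp [hnd]; omega

-- ===== VERDICT (by name: the statement is the Claim_ definition above) =====
theorem contradiction_spec : Claim_equal_contradiction := by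
  intro x _
  unfold Spec_contradiction
  cases x with
  | nil => rfl
  | cons h t =>
    have hh : h ∈ PySem.Set.ofList (h :: t) := (PySem.Set.mem_ofList _ _).mpr (by simp)
    have hne : (PySem.Set.ofList (h :: t)).map (fun v => PySem.Str.stripChars v "!") ≠ [] := by
      intro hc
      rw [List.map_eq_nil_iff] at hc
      rw [hc] at hh
      simp at hh
    have hA : contradiction (h :: t)
        = !decide (((PySem.Set.ofList (h :: t)).map (fun v => PySem.Str.stripChars v "!")).Nodup) := by
      rw [← a_dup_iff _ hne]
      simp [contradiction]
    have hB : contradiction_alt (h :: t)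
        = !decide (((PySem.Set.ofList (h :: t)).map (fun v => PySem.Str.stripChars v "!")).Nodup) := by
      rw [show contradiction_alt (h :: t)
          = contradictionAltLoop (PySem.Set.ofList (h :: t)) PySem.Set.empty from by
            simp [contradiction_alt]]
      cases hb : contradictionAltLoop (PySem.Set.ofList (h :: t)) PySem.Set.empty with
      | false =>
        have hgood := (altLoop_eq_false_iff _ _).mp hb
        simp [hgood.1]
      | true =>
        have hnn : ¬ ((PySem.Set.ofList (h :: t)).map (fun v => PySem.Str.stripChars v "!")).Nodup := by
          intro hnd
          have hfalse := (altLoop_eq_false_iff (PySem.Set.ofList (h :: t)) PySem.Set.empty).mpr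
            ⟨hnd, fun v _ hv => by simp [PySem.Set.empty] at hv⟩
          rw [hfalse] at hb
          cases hb
        simp [hnn]
    rw [hA, hB]
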